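-- pv_equiv track=rewrite | github.com/bnbowman/BifoAlgo | src/Chapter2/Sec22_CycleSeq.py | is_valid_subpeptide
-- ===== SOURCE A (Python) =====
-- def is_valid_subpeptide( peptide, spectrum ):
-- 	if sum(peptide) not in spectrum:
-- 		return False
-- 	if len(peptide) < 3:
-- 		return True
-- 	for i in range(2, len(peptide)):
-- 		if sum(peptide[-i:]) not in spectrum:
-- 			return False
-- 	return True
-- ===== SOURCE B (Python) =====
-- def is_valid_subpeptide(peptide, spectrum):
--     spec = set(spectrum)
--     if sum(peptide) not in spec:
--         return False
--     sums = []
--     s = 0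
--     for x in reversed(peptide):
--         s += x
--         sums.append(s)
--     return all(t in spec for t in sums[1:len(peptide) - 1])
-- ===== Notes on version B (the rewrite author's own statement) =====
-- stated objective: alternative
-- what changed: Spectrum membership goes through a set built once, and the suffix sums are produced incrementally in a single reverse accumulation pass instead of re-slicing and re-summing the peptide for each i.
import Mathlib
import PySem

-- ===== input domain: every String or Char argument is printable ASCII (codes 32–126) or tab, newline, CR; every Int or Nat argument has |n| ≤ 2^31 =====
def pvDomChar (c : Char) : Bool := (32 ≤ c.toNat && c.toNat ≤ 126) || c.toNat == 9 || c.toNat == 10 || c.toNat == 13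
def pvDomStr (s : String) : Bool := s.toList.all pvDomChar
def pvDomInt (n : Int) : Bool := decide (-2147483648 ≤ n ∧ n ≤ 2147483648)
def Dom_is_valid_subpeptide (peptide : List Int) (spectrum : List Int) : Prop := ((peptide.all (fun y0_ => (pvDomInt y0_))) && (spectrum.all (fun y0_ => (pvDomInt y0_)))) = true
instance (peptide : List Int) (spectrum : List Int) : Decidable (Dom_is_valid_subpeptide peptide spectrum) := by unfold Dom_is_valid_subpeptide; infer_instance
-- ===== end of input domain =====

-- B replaces A's per-i negative-slice-and-resum with one set for the spectrum and
-- incremental suffix sums in a single reverse pass (objective: alternative algorithm).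

-- ===== PORT A =====
-- the 'for i in range(2, len(peptide))' loop with its early 'return False'
def pvALoop (peptide : List Int) (spectrum : List Int) : List Int → Bool
  | [] => true
  | i :: rest =>
    if ¬ (PySem.List.slice peptide (some (-i)) none).sum ∈ spectrum then false
    else pvALoop peptide spectrum rest

def is_valid_subpeptide (peptide : List Int) (spectrum : List Int) : Bool :=
  if ¬ peptide.sum ∈ spectrum then false
  else if peptide.length < 3 then true
  else pvALoop peptide spectrum (PySem.List.pyRange 2 (peptide.length : Int) 1)

-- ===== PORT B =====
-- the accumulation loop 'for x in reversed(peptide): s += x; sums.append(s)'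
def pvBSums : List Int → Int → List Int
  | [], _ => []
  | x :: xs, s => (s + x) :: pvBSums xs (s + x)

def is_valid_subpeptide_alt (peptide : List Int) (spectrum : List Int) : Bool :=
  let spec : PySem.Set Int := PySem.Set.ofList spectrum
  if ¬ PySem.Set.contains spec peptide.sum then false
  else
    let sums := pvBSums peptide.reverse 0
    (PySem.List.slice sums (some 1) (some ((peptide.length : Int) - 1))).all
      (fun t => PySem.Set.contains spec t)

-- ===== PRECONDITION & SPEC =====
def Spec_is_valid_subpeptide (peptide : List Int) (spectrum : List Int) (out : Bool) : Prop := out = is_valid_subpeptide_alt peptide spectrum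
instance (peptide : List Int) (spectrum : List Int) (out : Bool) : Decidable (Spec_is_valid_subpeptide peptide spectrum out) := by unfold Spec_is_valid_subpeptide; infer_instance

-- ===== CLAIM (what is proved, stated in full; the proofs are below) =====
def Claim_equal_is_valid_subpeptide : Prop := ∀ (peptide : List Int) (spectrum : List Int), Dom_is_valid_subpeptide peptide spectrum → Spec_is_valid_subpeptide peptide spectrum (is_valid_subpeptide peptide spectrum)

-- ===== LEMMAS AND PROOFS =====

-- membership in the PySem set is membership in the spectrum list
theorem pv_contains_ofList (spectrum : List Int) (x : Int) :
    PySem.Set.contains (PySem.Set.ofList spectrum) x = decide (x ∈ spectrum) := by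
  simp [PySem.Set.contains, PySem.Set.mem_ofList]

-- A's loop is an 'all' over its index list
theorem pvALoop_eq_all (peptide spectrum : List Int) (l : List Int) :
    pvALoop peptide spectrum l
      = l.all (fun i => decide ((PySem.List.slice peptide (some (-i)) none).sum ∈ spectrum)) := by
  induction l with
  | nil => rfl
  | cons i rest ih =>
    by_cases h : (PySem.List.slice peptide (some (-i)) none).sum ∈ spectrum <;>
      simp [pvALoop, h, ih]

-- B's suffix-sum accumulator, characterised by index
theorem pvBSums_eq_map (l : List Int) (s : Int) :
    pvBSums l s = (List.range l.length).map (fun k => s + (l.take (k + 1)).sum) := by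
  induction l generalizing s with
  | nil => rfl
  | cons x xs ih =>
    simp only [pvBSums, ih, List.length_cons, List.range_succ_eq_map, List.map_cons,
      List.map_map]
    congr 1
    · simp
    · apply List.map_congr_left
      intro k _
      simp [List.take_succ_cons]
      ring

-- all respects pointwise equality on members
theorem pv_all_congr {α : Type} {l : List α} {f g : α → Bool}
    (h : ∀ x ∈ l, f x = g x) : l.all f = l.all g := by
  induction l with
  | nil => rfl
  | cons x xs ih =>
    simp only [List.all_cons, h x (List.mem_cons_self), ih fun y hy => h y (List.mem_cons_of_mem _ hy)]

theorem is_valid_subpeptide_spec' (peptide spectrum : List Int) :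
    is_valid_subpeptide peptide spectrum = is_valid_subpeptide_alt peptide spectrum := by
  unfold is_valid_subpeptide is_valid_subpeptide_alt
  simp only [pv_contains_ofList]
  by_cases hs : peptide.sum ∈ spectrum
  · simp only [hs, decide_true, not_true_eq_false, if_false]
    have hsums := pvBSums_eq_map peptide.reverse 0
    set n := peptide.length with hn
    have hrevlen : peptide.reverse.length = n := by simp [hn]
    rw [hrevlen] at hsums
    by_cases hsmall : n < 3
    · -- the sliced list is empty, both sides are true
      rw [if_pos hsmall]
      have hlen0 : (PySem.List.slice (pvBSums peptide.reverse 0) (some 1)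
          (some ((n : Int) - 1))).length = 0 := by
        rw [PySem.List.length_slice]
        have hL : (pvBSums peptide.reverse 0).length = n := by
          rw [hsums]; simp
        rw [hL]
        interval_cases n <;> decide
      rw [List.eq_nil_of_length_eq_zero hlen0]
      rfl
    · rw [if_neg hsmall]
      rw [Nat.not_lt] at hsmall
      -- rewrite B's sliced list as a map over List.range (n-2)
      have hb : PySem.List.slice (pvBSums peptide.reverse 0) (some 1) (some ((n : Int) - 1))
          = (List.range (n - 2)).map (fun k => (peptide.reverse.take (k + 2)).sum) := by
        rw [hsums]
        rw [PySem.List.slice_toNat ((List.range n).map fun k => 0 + (peptide.reverse.take (k + 1)).sum)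
          (a := 1) (b := (n : Int) - 1) (by norm_num) (by omega)]
        have ht1 : ((1 : Int)).toNat = 1 := rfl
        have ht2 : ((n : Int) - 1).toNat = n - 1 := by omega
        rw [ht1, ht2]
        have hrange : List.range n = 0 :: (List.range (n - 1)).map Nat.succ := by
          have : n = (n - 1) + 1 := by omega
          rw [this, List.range_succ_eq_map]
          simp
        rw [hrange]
        simp only [List.map_cons, List.drop_succ_cons, List.drop_zero, List.map_map,
          ← List.map_take, List.take_range]
        have hmin : min (n - 1 - 1) (n - 1) = n - 2 := by omega
        rw [hmin]
        apply List.map_congr_left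
        intro k _
        simp [Nat.succ_eq_add_one]
      rw [hb, pvALoop_eq_all, PySem.List.pyRange_one]
      have hcast : (((n : Int) - 2)).toNat = n - 2 := by omega
      rw [hcast, List.all_map, List.all_map]
      apply pv_all_congr
      intro k hk
      have hk' : k < n - 2 := List.mem_range.mp hk
      -- A's element: peptide[-(2+k):] = drop (n - (k+2))
      have hA : PySem.List.slice peptide (some (-(2 + (k : Int)))) none
          = peptide.drop (n - (k + 2)) := by
        have h2 : (2 + (k : Int)) = (((2 + k : Nat) : Int)) := by push_cast; ring
        rw [h2, PySem.List.slice_from_neg_natCast peptide (2 + k) (by omega)]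
        congr 1
        omega
      -- B's element: reverse.take (k+2) sums to the same suffix sum
      have hB : (peptide.reverse.take (k + 2)).sum = (peptide.drop (n - (k + 2))).sum := by
        rw [List.take_reverse]
        simp [hn]
      simp only [Function.comp_apply, hA, hB]
  · simp [hs]

-- ===== VERDICT (by name: the statement is the Claim_ definition above) =====
theorem is_valid_subpeptide_spec : Claim_equal_is_valid_subpeptide := by
  intro peptide spectrum _
  exact is_valid_subpeptide_spec' peptide spectrum
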